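-- pv_equiv track=rewrite | github.com/gagan114662/canaidoanything | app/services/ethics/cultural_sensitivity_service.py | _assess_cultural_significance
-- ===== SOURCE A (Python) =====
-- from typing import Dict, List, Any, Optional, Tuple
--
-- def _assess_cultural_significance(recognized_garments: List[Dict[str, Any]]) -> str:
--     """Assess overall cultural significance level"""
--     if not recognized_garments:
--         return 'none'
--
--     significance_levels = [item.get('cultural_significance', 'low') for item in recognized_garments]
--
--     if 'extremely_sacred' in significance_levels:
--         return 'extremely_sacred'
--     elif 'sacred' in significance_levels:
--         return 'sacred'
--     elif 'high' in significance_levels: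
--         return 'high'
--     elif 'medium' in significance_levels:
--         return 'medium'
--     else:
--         return 'low'
-- ===== SOURCE B (Python) =====
-- RANKS = {'low': 0, 'medium': 1, 'high': 2, 'sacred': 3, 'extremely_sacred': 4}
-- TIERS = ['low', 'medium', 'high', 'sacred', 'extremely_sacred']
--
--
-- def _assess_cultural_significance(recognized_garments):
--     """Assess overall cultural significance level"""
--     if not recognized_garments:
--         return 'none'
--     best = 0
--     for item in recognized_garments:
--         best = max(best, RANKS.get(item.get('cultural_significance', 'low'), 0))
--     return TIERS[best]
-- ===== Notes on version B (the rewrite author's own statement) =====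
-- stated objective: idiomatic
-- what changed: Replaces the four ordered membership scans over a materialized levels list with a single pass that folds the maximum numeric rank (via a rank table) and then indexes a tier-name list.
import Mathlib
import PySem

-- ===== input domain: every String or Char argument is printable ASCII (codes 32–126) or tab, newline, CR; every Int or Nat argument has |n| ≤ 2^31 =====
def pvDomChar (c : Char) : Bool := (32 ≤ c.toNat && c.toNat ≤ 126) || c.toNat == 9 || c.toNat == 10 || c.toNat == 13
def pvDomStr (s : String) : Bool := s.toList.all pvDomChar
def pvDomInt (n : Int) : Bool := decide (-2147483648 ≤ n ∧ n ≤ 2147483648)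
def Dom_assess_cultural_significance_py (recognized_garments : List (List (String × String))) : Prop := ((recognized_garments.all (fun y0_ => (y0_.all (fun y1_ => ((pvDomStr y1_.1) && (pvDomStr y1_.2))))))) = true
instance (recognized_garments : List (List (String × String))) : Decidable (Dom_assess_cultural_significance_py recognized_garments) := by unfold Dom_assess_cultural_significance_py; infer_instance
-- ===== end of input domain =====

-- B folds a single max-rank pass with a rank table instead of A's four ordered membership scans (idiomatic; same return values).


-- ===== PORT A =====
-- helper shared by both ports: item.get('cultural_significance', 'low')
def pvSig (item : List (String × String)) : String :=
  (PySem.Dict.mk item).getD "cultural_significance" "low"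

def assess_cultural_significance_py (recognized_garments : List (List (String × String))) : String :=
  if recognized_garments = [] then "none"
  else
    let significance_levels := recognized_garments.map pvSig
    if "extremely_sacred" ∈ significance_levels then "extremely_sacred"
    else if "sacred" ∈ significance_levels then "sacred"
    else if "high" ∈ significance_levels then "high"
    else if "medium" ∈ significance_levels then "medium"
    else "low"

-- ===== PORT B =====
def pvRanks : PySem.Dict String Nat :=
  PySem.Dict.mk [("low", 0), ("medium", 1), ("high", 2), ("sacred", 3), ("extremely_sacred", 4)]

def pvTiers : List String := ["low", "medium", "high", "sacred", "extremely_sacred"]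

def assess_cultural_significance_py_alt (recognized_garments : List (List (String × String))) : String :=
  if recognized_garments = [] then "none"
  else
    let best := recognized_garments.foldl (fun b item => max b (pvRanks.getD (pvSig item) 0)) 0
    -- TIERS[best]: exact since 0 ≤ best ≤ 4 < |TIERS| always (proved below), so no IndexError
    pvTiers.getD best ""

-- ===== PRECONDITION & SPEC =====
def Spec_assess_cultural_significance_py (recognized_garments : List (List (String × String))) (out : String) : Prop := out = assess_cultural_significance_py_alt recognized_garments
instance (recognized_garments : List (List (String × String))) (out : String) : Decidable (Spec_assess_cultural_significance_py recognized_garments out) := by unfold Spec_assess_cultural_significance_py; infer_instance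

-- ===== CLAIM (what is proved, stated in full; the proofs are below) =====
def Claim_equal_assess_cultural_significance_py : Prop := ∀ (recognized_garments : List (List (String × String))), Dom_assess_cultural_significance_py recognized_garments → Spec_assess_cultural_significance_py recognized_garments (assess_cultural_significance_py recognized_garments)

-- ===== LEMMAS AND PROOFS =====
-- rank of a significance string, as B computes it
def pvRank (s : String) : Nat := pvRanks.getD s 0

lemma pvRank_eq (s : String) :
    pvRank s = if s = "extremely_sacred" then 4 else if s = "sacred" then 3
      else if s = "high" then 2 else if s = "medium" then 1 else 0 := by
  unfold pvRank pvRanks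
  by_cases e4 : s = "extremely_sacred" <;> by_cases e3 : s = "sacred" <;>
    by_cases e2 : s = "high" <;> by_cases e1 : s = "medium" <;> by_cases e0 : s = "low" <;>
    simp_all [PySem.Dict.getD, PySem.Dict.get?, List.find?, eq_comm, beq_eq_decide]

lemma pvRank_le_four (s : String) : pvRank s ≤ 4 := by
  rw [pvRank_eq]; split_ifs <;> omega

lemma foldl_max_le (l : List (List (String × String))) (a c : Nat)
    (ha : a ≤ c) (h : ∀ x ∈ l, pvRank (pvSig x) ≤ c) :
    l.foldl (fun b item => max b (pvRank (pvSig item))) a ≤ c := by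
  induction l generalizing a with
  | nil => simpa using ha
  | cons x t ih =>
      simp only [List.foldl_cons]
      exact ih _ (max_le ha (h x (by simp))) (fun y hy => h y (by simp [hy]))

lemma start_le_foldl_max (l : List (List (String × String))) (a : Nat) :
    a ≤ l.foldl (fun b item => max b (pvRank (pvSig item))) a := by
  induction l generalizing a with
  | nil => simp
  | cons z u ih => simp only [List.foldl_cons]; exact le_trans (le_max_left _ _) (ih _)

lemma le_foldl_max (l : List (List (String × String))) (a : Nat) (x : List (String × String))
    (hx : x ∈ l) : pvRank (pvSig x) ≤ l.foldl (fun b item => max b (pvRank (pvSig item))) a := by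
  induction l generalizing a with
  | nil => cases hx
  | cons y t ih =>
      simp only [List.foldl_cons]
      rcases List.mem_cons.mp hx with h | h
      · subst h; exact le_trans (le_max_right _ _) (start_le_foldl_max t _)
      · exact ih _ h

lemma a_foldl_ge (l : List (List (String × String))) (s : String)
    (h : s ∈ l.map pvSig) :
    pvRank s ≤ l.foldl (fun b item => max b (pvRank (pvSig item))) 0 := by
  rcases List.mem_map.mp h with ⟨x, hx, hs⟩
  exact hs ▸ le_foldl_max l 0 x hx

theorem assess_cultural_significance_py_spec : Claim_equal_assess_cultural_significance_py := by
  intro rg _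
  unfold Spec_assess_cultural_significance_py
  unfold assess_cultural_significance_py assess_cultural_significance_py_alt
  by_cases hnil : rg = []
  · simp [hnil]
  simp only [if_neg hnil]
  have hfold : rg.foldl (fun b item => max b (pvRanks.getD (pvSig item) 0)) 0
      = rg.foldl (fun b item => max b (pvRank (pvSig item))) 0 := rfl
  rw [hfold]
  set M := rg.foldl (fun b item => max b (pvRank (pvSig item))) 0 with hM
  by_cases h4 : "extremely_sacred" ∈ rg.map pvSig
  · have hge := a_foldl_ge rg _ h4
    have hle := foldl_max_le rg 0 4 (by omega) (fun x _ => pvRank_le_four _)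
    have hv : pvRank "extremely_sacred" = 4 := by decide
    rw [hv] at hge
    have : M = 4 := by omega
    simp [h4, this, pvTiers]
  by_cases h3 : "sacred" ∈ rg.map pvSig
  · have hge := a_foldl_ge rg _ h3
    have hle := foldl_max_le rg 0 3 (by omega) (fun x hx => by
      rw [pvRank_eq]
      have : pvSig x ≠ "extremely_sacred" := fun he => h4 (List.mem_map.mpr ⟨x, hx, he⟩)
      split_ifs <;> first | omega | simp_all)
    have hv : pvRank "sacred" = 3 := by decide
    rw [hv] at hge
    have : M = 3 := by omega
    simp [h4, h3, this, pvTiers]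
  by_cases h2 : "high" ∈ rg.map pvSig
  · have hge := a_foldl_ge rg _ h2
    have hle := foldl_max_le rg 0 2 (by omega) (fun x hx => by
      rw [pvRank_eq]
      have e4 : pvSig x ≠ "extremely_sacred" := fun he => h4 (List.mem_map.mpr ⟨x, hx, he⟩)
      have e3 : pvSig x ≠ "sacred" := fun he => h3 (List.mem_map.mpr ⟨x, hx, he⟩)
      split_ifs <;> first | omega | simp_all)
    have hv : pvRank "high" = 2 := by decide
    rw [hv] at hge
    have : M = 2 := by omega
    simp [h4, h3, h2, this, pvTiers]
  by_cases h1 : "medium" ∈ rg.map pvSig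
  · have hge := a_foldl_ge rg _ h1
    have hle := foldl_max_le rg 0 1 (by omega) (fun x hx => by
      rw [pvRank_eq]
      have e4 : pvSig x ≠ "extremely_sacred" := fun he => h4 (List.mem_map.mpr ⟨x, hx, he⟩)
      have e3 : pvSig x ≠ "sacred" := fun he => h3 (List.mem_map.mpr ⟨x, hx, he⟩)
      have e2 : pvSig x ≠ "high" := fun he => h2 (List.mem_map.mpr ⟨x, hx, he⟩)
      split_ifs <;> first | omega | simp_all)
    have hv : pvRank "medium" = 1 := by decide
    rw [hv] at hge
    have : M = 1 := by omega
    simp [h4, h3, h2, h1, this, pvTiers]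
  · have hle := foldl_max_le rg 0 0 (by omega) (fun x hx => by
      rw [pvRank_eq]
      have e4 : pvSig x ≠ "extremely_sacred" := fun he => h4 (List.mem_map.mpr ⟨x, hx, he⟩)
      have e3 : pvSig x ≠ "sacred" := fun he => h3 (List.mem_map.mpr ⟨x, hx, he⟩)
      have e2 : pvSig x ≠ "high" := fun he => h2 (List.mem_map.mpr ⟨x, hx, he⟩)
      have e1 : pvSig x ≠ "medium" := fun he => h1 (List.mem_map.mpr ⟨x, hx, he⟩)
      split_ifs <;> first | omega | simp_all)
    have : M = 0 := by omega
    simp [h4, h3, h2, h1, this, pvTiers]
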